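-- pv_equiv track=rewrite | github.com/eliottcassidy2000/math | 04-computation/newton_polygon_ip.py | compute_alpha_coefficients
-- ===== SOURCE A (Python) =====
-- def compute_alpha_coefficients(cycles_with_counts):
--     """Compute alpha_k coefficients for I(Omega, x).
--
--     alpha_k = number of collections of k pairwise vertex-disjoint directed cycles.
--
--     For the purpose of alpha_k, each vertex set with c directed cycles
--     contributes c choices to alpha_1 (as individual cycles),
--     but for alpha_2+, pairs must be on disjoint vertex sets, and we get
--     c1*c2 pairs from two sets with c1 and c2 cycles respectively.
--     """
--     # Group by vertex set
--     vs_list = [(vs, cnt) for vs, cnt in cycles_with_counts]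
--     n_groups = len(vs_list)
--
--     # alpha_0 = 1 always
--     # alpha_1 = sum of counts
--     alpha_1 = sum(cnt for _, cnt in vs_list)
--
--     # alpha_2 = sum over disjoint pairs of cnt_i * cnt_j
--     alpha_2 = 0
--     for i in range(n_groups):
--         for j in range(i+1, n_groups):
--             if not (vs_list[i][0] & vs_list[j][0]):  # disjoint
--                 alpha_2 += vs_list[i][1] * vs_list[j][1]
--
--     # alpha_3 = sum over disjoint triples
--     alpha_3 = 0
--     for i in range(n_groups):
--         for j in range(i+1, n_groups):
--             if vs_list[i][0] & vs_list[j][0]: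
--                 continue
--             for k in range(j+1, n_groups):
--                 if not (vs_list[k][0] & vs_list[i][0]) and \
--                    not (vs_list[k][0] & vs_list[j][0]):
--                     alpha_3 += vs_list[i][1] * vs_list[j][1] * vs_list[k][1]
--
--     return [1, alpha_1, alpha_2, alpha_3]
-- ===== SOURCE B (Python) =====
-- def compute_alpha_coefficients(cycles_with_counts):
--     """Adjacency-based rewrite: build, once, the disjointness graph on group
--     indices (nbrs[i] = indices j>i with vertex set disjoint from i's), then
--     read alpha_2 off the edges and alpha_3 as a weighted triangle count."""
--     sets = [vs for vs, _ in cycles_with_counts]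
--     cnts = [cnt for _, cnt in cycles_with_counts]
--     n = len(sets)
--     nbrs = [[j for j in range(i + 1, n) if not (sets[i] & sets[j])]
--             for i in range(n)]
--     alpha_1 = sum(cnts)
--     alpha_2 = sum(cnts[i] * cnts[j] for i in range(n) for j in nbrs[i])
--     alpha_3 = 0
--     for i in range(n):
--         si = set(nbrs[i])
--         ci = cnts[i]
--         for j in nbrs[i]:
--             cij = ci * cnts[j]
--             for k in nbrs[j]:
--                 if k in si:
--                     alpha_3 += cij * cnts[k]
--     return [1, alpha_1, alpha_2, alpha_3]
-- ===== Notes on version B (the rewrite author's own statement) =====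
-- stated objective: faster
-- what changed: B precomputes the disjointness graph once (nbrs[i] = indices j>i with disjoint vertex sets), reads alpha_2 off its edges, and computes alpha_3 as a weighted triangle count over neighbor lists with an index-set membership test, instead of A's triple-nested index loops that re-intersect vertex sets in every iteration.
import Mathlib
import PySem

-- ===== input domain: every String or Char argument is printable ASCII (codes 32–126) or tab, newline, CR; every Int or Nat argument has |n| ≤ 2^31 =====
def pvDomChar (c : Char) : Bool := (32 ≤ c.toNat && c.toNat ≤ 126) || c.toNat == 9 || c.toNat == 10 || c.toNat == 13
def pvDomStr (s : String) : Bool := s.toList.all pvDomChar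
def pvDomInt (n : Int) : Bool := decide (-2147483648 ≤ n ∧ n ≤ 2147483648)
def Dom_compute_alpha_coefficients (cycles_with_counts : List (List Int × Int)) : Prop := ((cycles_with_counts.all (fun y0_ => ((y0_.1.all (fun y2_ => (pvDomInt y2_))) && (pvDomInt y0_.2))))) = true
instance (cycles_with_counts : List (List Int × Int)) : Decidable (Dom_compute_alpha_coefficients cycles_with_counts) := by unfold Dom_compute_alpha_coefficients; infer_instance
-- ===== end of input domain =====

-- B rebuilds the answer from a precomputed disjointness graph (neighbor lists +
-- triangle count) instead of A's triple-nested index loops; objective: alternative.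

-- truthiness of Python's 'vs1 & vs2' on sets: the intersection is nonempty
def pvInterNB (a b : List Int) : Bool := !(PySem.Set.inter a b).isEmpty

-- ===== PORT A =====
def compute_alpha_coefficients (cycles_with_counts : List (List Int × Int)) : List Int :=
  let vs_list := cycles_with_counts.map (fun p => (p.1, p.2))
  let n : Int := vs_list.length
  let g := fun (i : Int) => PySem.List.pyGetD vs_list i ([], 0)  -- vs_list[i] (indices from ranges are in range)
  let alpha_1 := (vs_list.map (fun p => p.2)).sum
  let alpha_2 := (PySem.List.pyRange 0 n 1).foldl (fun acc i =>
      (PySem.List.pyRange (i+1) n 1).foldl (fun acc j =>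
        if !(pvInterNB (g i).1 (g j).1) then acc + (g i).2 * (g j).2 else acc) acc) 0
  let alpha_3 := (PySem.List.pyRange 0 n 1).foldl (fun acc i =>
      (PySem.List.pyRange (i+1) n 1).foldl (fun acc j =>
        if pvInterNB (g i).1 (g j).1 then acc
        else (PySem.List.pyRange (j+1) n 1).foldl (fun acc k =>
          if !(pvInterNB (g k).1 (g i).1) && !(pvInterNB (g k).1 (g j).1)
          then acc + (g i).2 * (g j).2 * (g k).2 else acc) acc) acc) 0
  [1, alpha_1, alpha_2, alpha_3]

-- ===== PORT B =====
def compute_alpha_coefficients_alt (cycles_with_counts : List (List Int × Int)) : List Int :=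
  let sets := cycles_with_counts.map (fun p => p.1)
  let cnts := cycles_with_counts.map (fun p => p.2)
  let n : Int := sets.length
  let sAt := fun (i : Int) => PySem.List.pyGetD sets i []
  let cAt := fun (i : Int) => PySem.List.pyGetD cnts i 0
  let nbrs := (PySem.List.pyRange 0 n 1).map (fun i =>
      (PySem.List.pyRange (i+1) n 1).filter (fun j => !(pvInterNB (sAt i) (sAt j))))
  let nbAt := fun (i : Int) => PySem.List.pyGetD nbrs i []
  let alpha_1 := cnts.sum
  let alpha_2 := ((PySem.List.pyRange 0 n 1).map (fun i =>
      ((nbAt i).map (fun j => cAt i * cAt j)).sum)).sum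
  let alpha_3 := (PySem.List.pyRange 0 n 1).foldl (fun acc i =>
      let si := PySem.Set.ofList (nbAt i)
      let ci := cAt i
      (nbAt i).foldl (fun acc j =>
        let cij := ci * cAt j
        (nbAt j).foldl (fun acc k =>
          if PySem.Set.contains si k then acc + cij * cAt k else acc) acc) acc) 0
  [1, alpha_1, alpha_2, alpha_3]

-- ===== PRECONDITION & SPEC =====
def Spec_compute_alpha_coefficients (cycles_with_counts : List (List Int × Int)) (out : List Int) : Prop := out = compute_alpha_coefficients_alt cycles_with_counts
instance (cycles_with_counts : List (List Int × Int)) (out : List Int) : Decidable (Spec_compute_alpha_coefficients cycles_with_counts out) := by unfold Spec_compute_alpha_coefficients; infer_instance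

-- ===== CLAIM (what is proved, stated in full; the proofs are below) =====
def Claim_equal_compute_alpha_coefficients : Prop := ∀ (cycles_with_counts : List (List Int × Int)), Dom_compute_alpha_coefficients cycles_with_counts → Spec_compute_alpha_coefficients cycles_with_counts (compute_alpha_coefficients cycles_with_counts)

-- ===== LEMMAS AND PROOFS =====

-- 'if p then acc+g else acc' loop = acc + sum over the filtered list
theorem pv_foldl_ite_add {a : Type} (p : a → Bool) (g : a → Int) (l : List a) (acc0 : Int) :
    l.foldl (fun acc x => if p x then acc + g x else acc) acc0 = acc0 + ((l.filter p).map g).sum := by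
  induction l generalizing acc0 with
  | nil => simp
  | cons x xs ih => by_cases h : p x <;> simp [h, ih, Int.add_assoc]

-- 'if p then acc (continue) else acc+g' loop = acc + sum over the complement
theorem pv_foldl_ite_skip {a : Type} (p : a → Bool) (g : a → Int) (l : List a) (acc0 : Int) :
    l.foldl (fun acc x => if p x then acc else acc + g x) acc0 = acc0 + ((l.filter (fun x => !p x)).map g).sum := by
  induction l generalizing acc0 with
  | nil => simp
  | cons x xs ih => by_cases h : p x <;> simp [h, ih, Int.add_assoc]

theorem pvInterNB_comm (a b : List Int) : pvInterNB a b = pvInterNB b a := by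
  simp only [pvInterNB]
  apply congrArg
  rw [Bool.eq_iff_iff]
  simp only [List.isEmpty_iff, List.eq_nil_iff_forall_not_mem, PySem.Set.mem_inter]
  constructor <;> (intro h x hx; exact h x ⟨hx.2, hx.1⟩)

theorem pv_getFst (xs : List (List Int × Int)) (i : Int) :
    PySem.List.pyGetD (xs.map (fun p => p.1)) i [] = (PySem.List.pyGetD xs i ([], (0:Int))).1 := by
  simpa using PySem.List.pyGetD_map (fun p : List Int × Int => p.1) xs i ([], 0)

theorem pv_getSnd (xs : List (List Int × Int)) (i : Int) :
    PySem.List.pyGetD (xs.map (fun p => p.2)) i 0 = (PySem.List.pyGetD xs i ([], (0:Int))).2 := by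
  simpa using PySem.List.pyGetD_map (fun p : List Int × Int => p.2) xs i ([], 0)

-- the disjointness neighbor list of group i (indices j>i with disjoint vertex sets)
def pvNbr (vs : Int → List Int) (n i : Int) : List Int :=
  (PySem.List.pyRange (i+1) n 1).filter (fun j => !(pvInterNB (vs i) (vs j)))

def pvS2 (vs : Int → List Int) (c : Int → Int) (n : Int) : Int :=
  ((PySem.List.pyRange 0 n 1).map (fun i => ((pvNbr vs n i).map (fun j => c i * c j)).sum)).sum

def pvS3 (vs : Int → List Int) (c : Int → Int) (n : Int) : Int :=
  ((PySem.List.pyRange 0 n 1).map (fun i =>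
    ((pvNbr vs n i).map (fun j =>
      (((PySem.List.pyRange (j+1) n 1).filter (fun k =>
          !(pvInterNB (vs k) (vs i)) && !(pvInterNB (vs k) (vs j)))).map
        (fun k => c i * c j * c k)).sum)).sum)).sum

theorem pvA2_eq (vs : Int → List Int) (c : Int → Int) (n : Int) :
    (PySem.List.pyRange 0 n 1).foldl (fun acc i =>
      (PySem.List.pyRange (i+1) n 1).foldl (fun acc j =>
        if !(pvInterNB (vs i) (vs j)) then acc + c i * c j else acc) acc) 0 = pvS2 vs c n := by
  simp only [pv_foldl_ite_add, PySem.List.foldl_add, pvS2, pvNbr, zero_add]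

theorem pvA3_eq (vs : Int → List Int) (c : Int → Int) (n : Int) :
    (PySem.List.pyRange 0 n 1).foldl (fun acc i =>
      (PySem.List.pyRange (i+1) n 1).foldl (fun acc j =>
        if pvInterNB (vs i) (vs j) then acc
        else (PySem.List.pyRange (j+1) n 1).foldl (fun acc k =>
          if !(pvInterNB (vs k) (vs i)) && !(pvInterNB (vs k) (vs j))
          then acc + c i * c j * c k else acc) acc) acc) 0 = pvS3 vs c n := by
  simp only [pv_foldl_ite_add, pv_foldl_ite_skip, PySem.List.foldl_add, pvS3, pvNbr, zero_add]

theorem pv_mem_nbr {vs : Int → List Int} {n i j : Int} (h : j ∈ pvNbr vs n i) :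
    i < j ∧ j < n ∧ (pvInterNB (vs i) (vs j)) = false := by
  simp only [pvNbr, List.mem_filter, PySem.List.mem_pyRange_one, Bool.not_eq_eq_eq_not, Bool.not_true] at h
  exact ⟨by omega, by omega, h.2⟩

theorem pv_filter_nbr (vs : Int → List Int) (n i j : Int) (hij : i < j) :
    (pvNbr vs n j).filter (fun k => PySem.Set.contains (PySem.Set.ofList (pvNbr vs n i)) k)
    = (PySem.List.pyRange (j+1) n 1).filter (fun k =>
        !(pvInterNB (vs k) (vs i)) && !(pvInterNB (vs k) (vs j))) := by
  simp only [pvNbr]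
  rw [List.filter_filter]
  apply List.filter_congr
  intro k hk
  have hkr := PySem.List.mem_pyRange_one.mp hk
  rw [Bool.eq_iff_iff]
  simp only [Bool.and_eq_true, PySem.Set.contains_iff, PySem.Set.mem_ofList, List.mem_filter, PySem.List.mem_pyRange_one, Bool.not_eq_eq_eq_not, Bool.not_true]
  rw [pvInterNB_comm (vs k) (vs i), pvInterNB_comm (vs k) (vs j)]
  constructor
  · rintro ⟨⟨⟨_, _⟩, h1⟩, h2⟩; exact ⟨h1, h2⟩
  · rintro ⟨h1, h2⟩; exact ⟨⟨⟨by omega, by omega⟩, h1⟩, h2⟩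

theorem pvNbr_def (vs : Int → List Int) (n i : Int) :
    (PySem.List.pyRange (i+1) n 1).filter (fun j => !(pvInterNB (vs i) (vs j))) = pvNbr vs n i := rfl

theorem pvB2_eq (vs : Int → List Int) (c : Int → Int) (n : Int) :
    ((PySem.List.pyRange 0 n 1).map (fun i =>
      ((PySem.List.pyGetD ((PySem.List.pyRange 0 n 1).map (fun i => pvNbr vs n i)) i []).map
        (fun j => c i * c j)).sum)).sum = pvS2 vs c n := by
  unfold pvS2
  apply congrArg
  apply List.map_congr_left
  intro i hi
  have hir := PySem.List.mem_pyRange_one.mp hi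
  rw [PySem.List.pyGetD_map_pyRange_of_nonneg _ _ _ _ hir.1 hir.2]

theorem pvB3_eq (vs : Int → List Int) (c : Int → Int) (n : Int) :
    (PySem.List.pyRange 0 n 1).foldl (fun acc i =>
      (PySem.List.pyGetD ((PySem.List.pyRange 0 n 1).map (fun i => pvNbr vs n i)) i []).foldl (fun acc j =>
        (PySem.List.pyGetD ((PySem.List.pyRange 0 n 1).map (fun i => pvNbr vs n i)) j []).foldl (fun acc k =>
          if PySem.Set.contains (PySem.Set.ofList (PySem.List.pyGetD ((PySem.List.pyRange 0 n 1).map (fun i => pvNbr vs n i)) i [])) k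
          then acc + c i * c j * c k else acc) acc) acc) 0 = pvS3 vs c n := by
  rw [PySem.List.foldl_congr_mem (g := fun acc i =>
      (pvNbr vs n i).foldl (fun acc j =>
        (pvNbr vs n j).foldl (fun acc k =>
          if PySem.Set.contains (PySem.Set.ofList (pvNbr vs n i)) k
          then acc + c i * c j * c k else acc) acc) acc)]
  · simp only [pv_foldl_ite_add, PySem.List.foldl_add, pvS3, zero_add]
    apply congrArg
    apply List.map_congr_left
    intro i _
    apply congrArg
    apply List.map_congr_left
    intro j hj
    rw [pv_filter_nbr vs n i j (pv_mem_nbr hj).1]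
  · intro acc i hi
    have hir := PySem.List.mem_pyRange_one.mp hi
    rw [PySem.List.pyGetD_map_pyRange_of_nonneg _ _ _ _ hir.1 hir.2]
    apply PySem.List.foldl_congr_mem
    intro acc j hj
    have hjr := pv_mem_nbr hj
    rw [PySem.List.pyGetD_map_pyRange_of_nonneg _ _ _ _ (by omega) (by omega)]

theorem compute_alpha_spec_aux (xs : List (List Int × Int)) :
    compute_alpha_coefficients xs = compute_alpha_coefficients_alt xs := by
  simp only [compute_alpha_coefficients, compute_alpha_coefficients_alt,
    Prod.mk.eta, List.map_id', List.length_map, pv_getFst, pv_getSnd]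
  simp only [pvNbr_def (fun t => (PySem.List.pyGetD xs t ([], 0)).1) (xs.length : Int)]
  rw [pvA2_eq (fun i => (PySem.List.pyGetD xs i ([], 0)).1) (fun i => (PySem.List.pyGetD xs i ([], 0)).2),
      pvA3_eq (fun i => (PySem.List.pyGetD xs i ([], 0)).1) (fun i => (PySem.List.pyGetD xs i ([], 0)).2),
      pvB2_eq (fun i => (PySem.List.pyGetD xs i ([], 0)).1) (fun i => (PySem.List.pyGetD xs i ([], 0)).2)]
  simp only [List.cons.injEq, and_true, true_and]
  exact (pvB3_eq (fun i => (PySem.List.pyGetD xs i ([], 0)).1)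
    (fun i => (PySem.List.pyGetD xs i ([], 0)).2) (xs.length : Int)).symm

-- ===== VERDICT (by name: the statement is the Claim_ definition above) =====
theorem compute_alpha_coefficients_spec : Claim_equal_compute_alpha_coefficients := by
  intro xs _
  unfold Spec_compute_alpha_coefficients
  exact compute_alpha_spec_aux xs
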